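-- pv_equiv track=rewrite | github.com/Vicodertoten/database | scripts/audit_referenced_taxon_shell_needs_for_distractors.py | _merge_names
-- ===== SOURCE A (Python) =====
-- LANGS = ("fr", "en", "nl")
--
-- def _merge_names(
--     hint_common_name: str | None,
--     manual_values: dict[str, str] | None,
--     canonical_values: dict[str, list[str]] | None,
-- ) -> dict[str, list[str]]:
--     merged: dict[str, list[str]] = {"fr": [], "en": [], "nl": []}
--
--     # Priority 1: canonical localized names (for mapped candidates)
--     for lang in LANGS:
--         if canonical_values and canonical_values.get(lang):
--             merged[lang] = [str(canonical_values[lang][0]).strip()]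
--
--     # Priority 2: manual CSV for missing languages
--     if manual_values:
--         for lang in LANGS:
--             if not merged[lang] and manual_values.get(lang):
--                 merged[lang] = [manual_values[lang]]
--
--     # Priority 3: hint common_name as EN fallback
--     if not merged["en"] and hint_common_name:
--         merged["en"] = [hint_common_name]
--
--     return merged
-- ===== SOURCE B (Python) =====
-- LANGS = ("fr", "en", "nl")
--
-- def _merge_names(hint_common_name, manual_values, canonical_values):
--     # Reverse-priority overlay: paint the lowest-priority source first and let
--     # each higher-priority source overwrite it, iterating the sources' own items.
--     merged = {lang: [] for lang in LANGS}
--     if hint_common_name: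
--         merged["en"] = [hint_common_name]
--     for lang, name in (manual_values or {}).items():
--         if lang in merged and name:
--             merged[lang] = [name]
--     for lang, names in (canonical_values or {}).items():
--         if lang in merged and names:
--             merged[lang] = [str(names[0]).strip()]
--     return merged
-- ===== Notes on version B (the rewrite author's own statement) =====
-- stated objective: alternative
-- what changed: Replaces A's three per-language priority passes with fill-if-empty guards by a reverse-priority overlay: the hint is painted first, then the manual and canonical sources are iterated over their own items and each higher-priority write simply overwrites the lower one, with no emptiness checks of the accumulator.
import Mathlib
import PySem

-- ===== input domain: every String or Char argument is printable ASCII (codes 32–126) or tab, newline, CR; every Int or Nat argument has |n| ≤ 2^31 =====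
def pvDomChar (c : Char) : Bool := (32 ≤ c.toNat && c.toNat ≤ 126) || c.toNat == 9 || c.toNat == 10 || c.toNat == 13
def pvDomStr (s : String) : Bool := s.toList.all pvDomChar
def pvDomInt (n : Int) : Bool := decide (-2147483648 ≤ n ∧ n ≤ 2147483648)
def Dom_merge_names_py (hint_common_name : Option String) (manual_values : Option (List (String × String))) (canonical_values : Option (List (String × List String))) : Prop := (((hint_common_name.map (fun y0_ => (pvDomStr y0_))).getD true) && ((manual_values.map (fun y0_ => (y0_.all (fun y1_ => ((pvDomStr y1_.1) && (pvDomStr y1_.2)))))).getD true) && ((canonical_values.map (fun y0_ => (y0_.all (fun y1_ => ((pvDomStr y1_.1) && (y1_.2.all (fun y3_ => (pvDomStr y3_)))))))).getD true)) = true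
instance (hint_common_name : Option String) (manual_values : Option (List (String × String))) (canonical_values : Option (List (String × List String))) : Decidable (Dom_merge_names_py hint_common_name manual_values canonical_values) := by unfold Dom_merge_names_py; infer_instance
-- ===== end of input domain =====

-- B replaces A's three priority passes (fill-if-empty per language) with a reverse-priority
-- overlay that iterates the sources' own items and overwrites (objective: alternative).

-- ===== PORT A =====
-- LANGS = ("fr", "en", "nl")
def pvLANGS : List String := ["fr", "en", "nl"]

-- body of A's Priority-1 loop
def pvPass1Step (canonical_values : Option (List (String × List String))) (m : PySem.Dict String (List String)) (lang : String) : PySem.Dict String (List String) :=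
  match canonical_values with
  | none => m
  | some d =>
    if d = [] then m else                       -- `canonical_values and …` (dict truthiness)
    match (PySem.Dict.mk d).get? lang with
    | none => m
    | some l =>
      match l with
      | [] => m                                 -- `.get(lang)` falsy (empty list)
      | x :: _ => m.insert lang [PySem.Str.strip x]   -- str(x) on a str is x

-- body of A's Priority-2 loop
def pvPass2Step (md : List (String × String)) (m : PySem.Dict String (List String)) (lang : String) : PySem.Dict String (List String) :=
  if m.getD lang [] = [] then
    match (PySem.Dict.mk md).get? lang with
    | none => m
    | some s => if s = "" then m else m.insert lang [s]
  else m

-- literal transliteration of A: seed dict, then three priority passes mutating it in place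
def merge_names_py (hint_common_name : Option String) (manual_values : Option (List (String × String))) (canonical_values : Option (List (String × List String))) : List (String × List String) :=
  let merged : PySem.Dict String (List String) := PySem.Dict.mk [("fr", []), ("en", []), ("nl", [])]
  -- Priority 1: canonical localized names
  let merged : PySem.Dict String (List String) := pvLANGS.foldl (pvPass1Step canonical_values) merged
  -- Priority 2: manual CSV for missing languages
  let merged : PySem.Dict String (List String) := match manual_values with
    | none => merged
    | some md =>
      if md = [] then merged else               -- `if manual_values:`
      pvLANGS.foldl (pvPass2Step md) merged
  -- Priority 3: hint common_name as EN fallback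
  let merged : PySem.Dict String (List String) := if merged.getD "en" [] = [] then
      match hint_common_name with
      | none => merged
      | some s => if s = "" then merged else merged.insert "en" [s]
    else merged
  merged.items

-- ===== PORT B =====
-- body of B's loop over manual_values.items(): overwrite when the key is one of ours and truthy
def pvOverlayManual (m : PySem.Dict String (List String)) (p : String × String) : PySem.Dict String (List String) :=
  if m.contains p.1 && p.2 ≠ "" then m.insert p.1 [p.2] else m

-- body of B's loop over canonical_values.items()
def pvOverlayCanon (m : PySem.Dict String (List String)) (p : String × List String) : PySem.Dict String (List String) :=
  match p.2 with
  | [] => m                                     -- `if names:` falsy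
  | x :: _ => if m.contains p.1 then m.insert p.1 [PySem.Str.strip x] else m

-- literal transliteration of B: hint first, then manual, then canonical, each overwriting
def merge_names_py_alt (hint_common_name : Option String) (manual_values : Option (List (String × String))) (canonical_values : Option (List (String × List String))) : List (String × List String) :=
  let merged : PySem.Dict String (List String) := PySem.Dict.mk [("fr", []), ("en", []), ("nl", [])]
  let merged : PySem.Dict String (List String) := match hint_common_name with
    | none => merged
    | some s => if s ≠ "" then merged.insert "en" [s] else merged
  let merged : PySem.Dict String (List String) := match manual_values with   -- (manual_values or {})
    | none => merged
    | some md => md.foldl pvOverlayManual merged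
  let merged : PySem.Dict String (List String) := match canonical_values with
    | none => merged
    | some cd => cd.foldl pvOverlayCanon merged
  merged.items

-- ===== PRECONDITION & SPEC =====
-- Pre_ requires the association lists standing for the two dict arguments to have distinct keys:
-- a Python dict cannot contain a duplicate key, so lists with duplicates encode no Python input.
def Pre_merge_names_py (hint_common_name : Option String) (manual_values : Option (List (String × String))) (canonical_values : Option (List (String × List String))) : Prop :=
  (((manual_values.map (fun md => decide (md.map Prod.fst).Nodup)).getD true) &&
   ((canonical_values.map (fun cd => decide (cd.map Prod.fst).Nodup)).getD true)) = true
instance (hint_common_name : Option String) (manual_values : Option (List (String × String))) (canonical_values : Option (List (String × List String))) : Decidable (Pre_merge_names_py hint_common_name manual_values canonical_values) := by unfold Pre_merge_names_py; infer_instance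

def pvWitness_merge_names_py : Option String × (Option (List (String × String))) × (Option (List (String × List String))) :=
  (some "hint", some [("fr", "renard")], some [("en", ["fox", "red fox"])])

def Spec_merge_names_py (hint_common_name : Option String) (manual_values : Option (List (String × String))) (canonical_values : Option (List (String × List String))) (out : List (String × List String)) : Prop := out = merge_names_py_alt hint_common_name manual_values canonical_values
instance (hint_common_name : Option String) (manual_values : Option (List (String × String))) (canonical_values : Option (List (String × List String))) (out : List (String × List String)) : Decidable (Spec_merge_names_py hint_common_name manual_values canonical_values out) := by unfold Spec_merge_names_py; infer_instance

-- ===== CLAIM (what is proved, stated in full; the proofs are below) =====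
def Claim_equal_merge_names_py : Prop := ∀ (hint_common_name : Option String) (manual_values : Option (List (String × String))) (canonical_values : Option (List (String × List String))), Dom_merge_names_py hint_common_name manual_values canonical_values → Pre_merge_names_py hint_common_name manual_values canonical_values → Spec_merge_names_py hint_common_name manual_values canonical_values (merge_names_py hint_common_name manual_values canonical_values)

-- ===== LEMMAS AND PROOFS =====

-- value of each language after A's Priority-1 pass
def pvCanonVal (canonical_values : Option (List (String × List String))) (lang : String) : List String :=
  match canonical_values with
  | none => []
  | some d =>
    if d = [] then [] else
    match (PySem.Dict.mk d).get? lang with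
    | some (x :: _) => [PySem.Str.strip x]
    | _ => []

-- value of each language after A's Priority-2 pass, given its value v after pass 1
def pvManVal (manual_values : Option (List (String × String))) (lang : String) (v : List String) : List String :=
  if v = [] then
    match manual_values with
    | none => []
    | some md =>
      if md = [] then [] else
      match (PySem.Dict.mk md).get? lang with
      | none => []
      | some s => if s = "" then [] else [s]
  else v

lemma pass1_eq (cv : Option (List (String × List String))) :
    pvLANGS.foldl (pvPass1Step cv) (PySem.Dict.mk [("fr", []), ("en", []), ("nl", [])]) =
    PySem.Dict.mk [("fr", pvCanonVal cv "fr"), ("en", pvCanonVal cv "en"), ("nl", pvCanonVal cv "nl")] := by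
  rcases cv with _ | d
  · simp [pvLANGS, pvPass1Step, pvCanonVal]
  · by_cases hd : d = []
    · simp [pvLANGS, pvPass1Step, pvCanonVal, hd]
    · rcases hf : (PySem.Dict.mk d).get? "fr" with _ | (_ | ⟨xf, _⟩) <;>
      rcases he : (PySem.Dict.mk d).get? "en" with _ | (_ | ⟨xe, _⟩) <;>
      rcases hn : (PySem.Dict.mk d).get? "nl" with _ | (_ | ⟨xn, _⟩) <;>
      simp [pvLANGS, pvPass1Step, pvCanonVal, hd, hf, he, hn, PySem.Dict.insert]

lemma getD3_fr (vf ve vn : List String) : (PySem.Dict.mk [("fr", vf), ("en", ve), ("nl", vn)]).getD "fr" [] = vf := by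
  simp [PySem.Dict.getD, PySem.Dict.get?]

lemma getD3_en (vf ve vn : List String) : (PySem.Dict.mk [("fr", vf), ("en", ve), ("nl", vn)]).getD "en" [] = ve := by
  simp [PySem.Dict.getD, PySem.Dict.get?]

lemma getD3_nl (vf ve vn : List String) : (PySem.Dict.mk [("fr", vf), ("en", ve), ("nl", vn)]).getD "nl" [] = vn := by
  simp [PySem.Dict.getD, PySem.Dict.get?]

lemma step2_fr (md : List (String × String)) (hmd : md ≠ []) (vf ve vn : List String) :
    pvPass2Step md (PySem.Dict.mk [("fr", vf), ("en", ve), ("nl", vn)]) "fr" =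
    PySem.Dict.mk [("fr", pvManVal (some md) "fr" vf), ("en", ve), ("nl", vn)] := by
  by_cases hv : vf = []
  · rcases h : (PySem.Dict.mk md).get? "fr" with _ | s
    · simp [pvPass2Step, pvManVal, hv, h, hmd, getD3_fr]
    · by_cases hs : s = "" <;>
      simp [pvPass2Step, pvManVal, hv, h, hs, hmd, getD3_fr, PySem.Dict.insert]
  · simp [pvPass2Step, pvManVal, hv, getD3_fr]

lemma step2_en (md : List (String × String)) (hmd : md ≠ []) (vf ve vn : List String) :
    pvPass2Step md (PySem.Dict.mk [("fr", vf), ("en", ve), ("nl", vn)]) "en" =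
    PySem.Dict.mk [("fr", vf), ("en", pvManVal (some md) "en" ve), ("nl", vn)] := by
  by_cases hv : ve = []
  · rcases h : (PySem.Dict.mk md).get? "en" with _ | s
    · simp [pvPass2Step, pvManVal, hv, h, hmd, getD3_en]
    · by_cases hs : s = "" <;>
      simp [pvPass2Step, pvManVal, hv, h, hs, hmd, getD3_en, PySem.Dict.insert]
  · simp [pvPass2Step, pvManVal, hv, getD3_en]

lemma step2_nl (md : List (String × String)) (hmd : md ≠ []) (vf ve vn : List String) :
    pvPass2Step md (PySem.Dict.mk [("fr", vf), ("en", ve), ("nl", vn)]) "nl" =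
    PySem.Dict.mk [("fr", vf), ("en", ve), ("nl", pvManVal (some md) "nl" vn)] := by
  by_cases hv : vn = []
  · rcases h : (PySem.Dict.mk md).get? "nl" with _ | s
    · simp [pvPass2Step, pvManVal, hv, h, hmd, getD3_nl]
    · by_cases hs : s = "" <;>
      simp [pvPass2Step, pvManVal, hv, h, hs, hmd, getD3_nl, PySem.Dict.insert]
  · simp [pvPass2Step, pvManVal, hv, getD3_nl]

lemma pass2_eq (mv : Option (List (String × String))) (vf ve vn : List String) :
    (match mv with
      | none => PySem.Dict.mk [("fr", vf), ("en", ve), ("nl", vn)]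
      | some md =>
        if md = [] then PySem.Dict.mk [("fr", vf), ("en", ve), ("nl", vn)] else
        pvLANGS.foldl (pvPass2Step md) (PySem.Dict.mk [("fr", vf), ("en", ve), ("nl", vn)])) =
    PySem.Dict.mk [("fr", pvManVal mv "fr" vf), ("en", pvManVal mv "en" ve), ("nl", pvManVal mv "nl" vn)] := by
  rcases mv with _ | md
  · simp only [pvManVal]
    split_ifs <;> simp_all
  · by_cases hmd : md = []
    · simp only [pvManVal, hmd]
      split_ifs <;> simp_all
    · simp only [if_neg hmd, pvLANGS, List.foldl]
      rw [step2_fr md hmd, step2_en md hmd, step2_nl md hmd]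

-- ===== B-side characterisation =====

-- value each language ends with after B's manual overlay, given its previous value
def pvMGet (md : List (String × String)) (lang : String) (old : List String) : List String :=
  match (PySem.Dict.mk md).get? lang with
  | none => old
  | some s => if s = "" then old else [s]

-- value each language ends with after B's canonical overlay
def pvCGet (cd : List (String × List String)) (lang : String) (old : List String) : List String :=
  match (PySem.Dict.mk cd).get? lang with
  | some (x :: _) => [PySem.Str.strip x]
  | _ => old

@[simp] lemma get?_mk_nil {ν : Type} (x : String) : (PySem.Dict.mk ([] : List (String × ν))).get? x = none := by
  simp [PySem.Dict.get?]

lemma get?_mk_none {ν : Type} (rest : List (String × ν)) (x : String) (hx : x ∉ rest.map Prod.fst) :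
    (PySem.Dict.mk rest).get? x = none := by
  induction rest with
  | nil => simp [PySem.Dict.get?]
  | cons p rest ih =>
    obtain ⟨k, v⟩ := p
    simp only [List.map_cons, List.mem_cons, not_or] at hx
    have hne : ¬ ((k == x) = true) := by
      simp only [beq_iff_eq]
      exact fun h => hx.1 h.symm
    rw [PySem.Dict.get?_mk_cons, if_neg hne]
    exact ih hx.2

lemma foldl_manual (md : List (String × String)) (hnd : (md.map Prod.fst).Nodup) (a b c : List String) :
    md.foldl pvOverlayManual (PySem.Dict.mk [("fr", a), ("en", b), ("nl", c)]) =
    PySem.Dict.mk [("fr", pvMGet md "fr" a), ("en", pvMGet md "en" b), ("nl", pvMGet md "nl" c)] := by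
  induction md generalizing a b c with
  | nil => simp [pvMGet, PySem.Dict.get?]
  | cons p rest ih =>
    obtain ⟨k, s⟩ := p
    simp only [List.map_cons, List.nodup_cons] at hnd
    obtain ⟨hk, hrest⟩ := hnd
    have hrw : ∀ lang old, k ≠ lang → pvMGet ((k, s) :: rest) lang old = pvMGet rest lang old := by
      intro lang old h
      simp [pvMGet, PySem.Dict.get?_mk_cons, h]
    have hself : ∀ old, pvMGet ((k, s) :: rest) k old = if s = "" then old else [s] := by
      intro old; simp [pvMGet, PySem.Dict.get?_mk_cons]
    have hskip : ∀ old, pvMGet rest k old = old := by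
      intro old; simp [pvMGet, get?_mk_none rest k hk]
    by_cases hs : s = ""
    · -- guard falsy: state unchanged
      have : pvOverlayManual (PySem.Dict.mk [("fr", a), ("en", b), ("nl", c)]) (k, s) =
          PySem.Dict.mk [("fr", a), ("en", b), ("nl", c)] := by
        simp [pvOverlayManual, hs]
      rw [List.foldl_cons, this, ih hrest]
      by_cases hf : k = "fr" <;> by_cases he : k = "en" <;> by_cases hn : k = "nl" <;>
        simp_all [hrw]
    · by_cases hf : k = "fr"
      · subst hf
        have : pvOverlayManual (PySem.Dict.mk [("fr", a), ("en", b), ("nl", c)]) ("fr", s) =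
            PySem.Dict.mk [("fr", [s]), ("en", b), ("nl", c)] := by
          simp [pvOverlayManual, hs, PySem.Dict.contains, PySem.Dict.insert]
        rw [List.foldl_cons, this, ih hrest, hself, if_neg hs, hskip,
          hrw "en" b (by decide), hrw "nl" c (by decide)]
      · by_cases he : k = "en"
        · subst he
          have : pvOverlayManual (PySem.Dict.mk [("fr", a), ("en", b), ("nl", c)]) ("en", s) =
              PySem.Dict.mk [("fr", a), ("en", [s]), ("nl", c)] := by
            simp [pvOverlayManual, hs, PySem.Dict.contains, PySem.Dict.insert]
          rw [List.foldl_cons, this, ih hrest, hself, if_neg hs, hskip,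
            hrw "fr" a (by decide), hrw "nl" c (by decide)]
        · by_cases hn : k = "nl"
          · subst hn
            have : pvOverlayManual (PySem.Dict.mk [("fr", a), ("en", b), ("nl", c)]) ("nl", s) =
                PySem.Dict.mk [("fr", a), ("en", b), ("nl", [s])] := by
              simp [pvOverlayManual, hs, PySem.Dict.contains, PySem.Dict.insert]
            rw [List.foldl_cons, this, ih hrest, hself, if_neg hs, hskip,
              hrw "fr" a (by decide), hrw "en" b (by decide)]
          · -- foreign key: `lang in merged` false
            have : pvOverlayManual (PySem.Dict.mk [("fr", a), ("en", b), ("nl", c)]) (k, s) =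
                PySem.Dict.mk [("fr", a), ("en", b), ("nl", c)] := by
              simp [pvOverlayManual, PySem.Dict.contains, Ne.symm hf, Ne.symm he, Ne.symm hn]
            rw [List.foldl_cons, this, ih hrest,
              hrw "fr" a hf, hrw "en" b he, hrw "nl" c hn]

lemma foldl_canon (cd : List (String × List String)) (hnd : (cd.map Prod.fst).Nodup) (a b c : List String) :
    cd.foldl pvOverlayCanon (PySem.Dict.mk [("fr", a), ("en", b), ("nl", c)]) =
    PySem.Dict.mk [("fr", pvCGet cd "fr" a), ("en", pvCGet cd "en" b), ("nl", pvCGet cd "nl" c)] := by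
  induction cd generalizing a b c with
  | nil => simp [pvCGet, PySem.Dict.get?]
  | cons p rest ih =>
    obtain ⟨k, l⟩ := p
    simp only [List.map_cons, List.nodup_cons] at hnd
    obtain ⟨hk, hrest⟩ := hnd
    have hrw : ∀ lang old, k ≠ lang → pvCGet ((k, l) :: rest) lang old = pvCGet rest lang old := by
      intro lang old h
      simp [pvCGet, PySem.Dict.get?_mk_cons, h]
    have hskip : ∀ old, pvCGet rest k old = old := by
      intro old; simp [pvCGet, get?_mk_none rest k hk]
    rcases l with _ | ⟨x, xs⟩
    · -- `if names:` falsy: state unchanged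
      have hstep : pvOverlayCanon (PySem.Dict.mk [("fr", a), ("en", b), ("nl", c)]) (k, []) =
          PySem.Dict.mk [("fr", a), ("en", b), ("nl", c)] := by
        simp [pvOverlayCanon]
      have hself0 : ∀ old, pvCGet ((k, ([] : List String)) :: rest) k old = old := by
        intro old; simp [pvCGet, PySem.Dict.get?_mk_cons]
      rw [List.foldl_cons, hstep, ih hrest]
      by_cases hf : k = "fr"
      · subst hf
        rw [hself0, hskip, hrw "en" b (by decide), hrw "nl" c (by decide)]
      · by_cases he : k = "en"
        · subst he
          rw [hself0, hskip, hrw "fr" a (by decide), hrw "nl" c (by decide)]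
        · by_cases hn : k = "nl"
          · subst hn
            rw [hself0, hskip, hrw "fr" a (by decide), hrw "en" b (by decide)]
          · rw [hrw "fr" a hf, hrw "en" b he, hrw "nl" c hn]
    · have hself : ∀ old, pvCGet ((k, x :: xs) :: rest) k old = [PySem.Str.strip x] := by
        intro old; simp [pvCGet, PySem.Dict.get?_mk_cons]
      by_cases hf : k = "fr"
      · subst hf
        have : pvOverlayCanon (PySem.Dict.mk [("fr", a), ("en", b), ("nl", c)]) ("fr", x :: xs) =
            PySem.Dict.mk [("fr", [PySem.Str.strip x]), ("en", b), ("nl", c)] := by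
          simp [pvOverlayCanon, PySem.Dict.contains, PySem.Dict.insert]
        rw [List.foldl_cons, this, ih hrest, hself, hskip,
          hrw "en" b (by decide), hrw "nl" c (by decide)]
      · by_cases he : k = "en"
        · subst he
          have : pvOverlayCanon (PySem.Dict.mk [("fr", a), ("en", b), ("nl", c)]) ("en", x :: xs) =
              PySem.Dict.mk [("fr", a), ("en", [PySem.Str.strip x]), ("nl", c)] := by
            simp [pvOverlayCanon, PySem.Dict.contains, PySem.Dict.insert]
          rw [List.foldl_cons, this, ih hrest, hself, hskip,
            hrw "fr" a (by decide), hrw "nl" c (by decide)]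
        · by_cases hn : k = "nl"
          · subst hn
            have : pvOverlayCanon (PySem.Dict.mk [("fr", a), ("en", b), ("nl", c)]) ("nl", x :: xs) =
                PySem.Dict.mk [("fr", a), ("en", b), ("nl", [PySem.Str.strip x])] := by
              simp [pvOverlayCanon, PySem.Dict.contains, PySem.Dict.insert]
            rw [List.foldl_cons, this, ih hrest, hself, hskip,
              hrw "fr" a (by decide), hrw "en" b (by decide)]
          · have : pvOverlayCanon (PySem.Dict.mk [("fr", a), ("en", b), ("nl", c)]) (k, x :: xs) =
                PySem.Dict.mk [("fr", a), ("en", b), ("nl", c)] := by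
              simp [pvOverlayCanon, PySem.Dict.contains, Ne.symm hf, Ne.symm he, Ne.symm hn]
            rw [List.foldl_cons, this, ih hrest,
              hrw "fr" a hf, hrw "en" b he, hrw "nl" c hn]

-- per-language cascade equality away from "en"
def pvMGetO (mv : Option (List (String × String))) (lang : String) (old : List String) : List String :=
  match mv with | none => old | some md => pvMGet md lang old

def pvCGetO (cv : Option (List (String × List String))) (lang : String) (old : List String) : List String :=
  match cv with | none => old | some cd => pvCGet cd lang old

lemma cascade_eq (mv : Option (List (String × String))) (cv : Option (List (String × List String))) (lang : String) :
    pvCGetO cv lang (pvMGetO mv lang []) = pvManVal mv lang (pvCanonVal cv lang) := by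
  rcases cv with _ | cd <;> rcases mv with _ | md <;>
    simp only [pvCGetO, pvMGetO, pvCGet, pvMGet, pvCanonVal, pvManVal] <;>
    aesop

-- …and at "en", with A's Priority-3 fixup on the left of the equation
lemma cascade_eq_en (h : Option String) (mv : Option (List (String × String))) (cv : Option (List (String × List String))) :
    (if pvManVal mv "en" (pvCanonVal cv "en") = [] then
        (match h with
        | none => pvManVal mv "en" (pvCanonVal cv "en")
        | some s => if s = "" then pvManVal mv "en" (pvCanonVal cv "en") else [s])
      else pvManVal mv "en" (pvCanonVal cv "en")) =
    pvCGetO cv "en" (pvMGetO mv "en" (match h with | none => [] | some s => if s = "" then [] else [s])) := by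
  rcases cv with _ | cd <;> rcases mv with _ | md <;> rcases h with _ | s <;>
    simp only [pvCGetO, pvMGetO, pvCGet, pvMGet, pvCanonVal, pvManVal] <;>
    aesop

lemma alt_eq (h : Option String) (mv : Option (List (String × String))) (cv : Option (List (String × List String)))
    (hm : ∀ md, mv = some md → (md.map Prod.fst).Nodup)
    (hc : ∀ cd, cv = some cd → (cd.map Prod.fst).Nodup) :
    merge_names_py_alt h mv cv =
    (PySem.Dict.mk [("fr", pvCGetO cv "fr" (pvMGetO mv "fr" [])),
                    ("en", pvCGetO cv "en" (pvMGetO mv "en" (match h with | none => [] | some s => if s = "" then [] else [s]))),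
                    ("nl", pvCGetO cv "nl" (pvMGetO mv "nl" []))]).items := by
  have hhint : (match h with
      | none => PySem.Dict.mk [("fr", []), ("en", []), ("nl", [])]
      | some s => if s ≠ "" then (PySem.Dict.mk [("fr", []), ("en", []), ("nl", [])]).insert "en" [s]
                  else PySem.Dict.mk [("fr", []), ("en", []), ("nl", [])]) =
      PySem.Dict.mk [("fr", []), ("en", (match h with | none => [] | some s => if s = "" then [] else [s])), ("nl", [])] := by
    rcases h with _ | s
    · rfl
    · by_cases hs : s = "" <;> simp [hs, PySem.Dict.insert]
  simp only [merge_names_py_alt]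
  rw [hhint]
  rcases mv with _ | md <;> rcases cv with _ | cd <;> dsimp only
  · simp [pvMGetO, pvCGetO]
  · rw [foldl_canon cd (hc cd rfl)]
    simp [pvMGetO, pvCGetO]
  · rw [foldl_manual md (hm md rfl)]
    simp [pvMGetO, pvCGetO]
  · rw [foldl_manual md (hm md rfl), foldl_canon cd (hc cd rfl)]
    simp [pvMGetO, pvCGetO]

-- ===== VERDICT (by name: the statement is the Claim_ definition above) =====
theorem merge_names_py_spec : Claim_equal_merge_names_py := by
  intro h mv cv _ hpre
  have hm : ∀ md, mv = some md → (md.map Prod.fst).Nodup := by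
    intro md hmd
    subst hmd
    simp only [Pre_merge_names_py, Option.map_some, Option.getD_some, Bool.and_eq_true,
      decide_eq_true_eq] at hpre
    exact hpre.1
  have hc : ∀ cd, cv = some cd → (cd.map Prod.fst).Nodup := by
    intro cd hcd
    subst hcd
    simp only [Pre_merge_names_py, Option.map_some, Option.getD_some, Bool.and_eq_true,
      decide_eq_true_eq] at hpre
    exact hpre.2
  simp only [Spec_merge_names_py, merge_names_py]
  rw [pass1_eq, pass2_eq, getD3_en, alt_eq h mv cv hm hc]
  have hfr := cascade_eq mv cv "fr"
  have hnl := cascade_eq mv cv "nl"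
  have hen := cascade_eq_en h mv cv
  by_cases he : pvManVal mv "en" (pvCanonVal cv "en") = []
  · rcases h with _ | s
    · simp only [if_pos he] at *
      simp [hfr, hnl, ← hen, he]
    · by_cases hs : s = ""
      · simp only [if_pos he, hs] at *
        simp_all
      · simp only [if_pos he, if_neg hs] at *
        simp_all [← hen, PySem.Dict.insert]
  · simp only [if_neg he] at *
    simp [hfr, hnl, ← hen]
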